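-- pv_equiv track=rewrite | github.com/yuriboyka14/weird_text | functions.py | word_to_replace
-- ===== SOURCE A (Python) =====
-- def word_to_replace(x):                         #auxilary function checking if word has to be replaced
--     count = 0                                   #by word from shuffled_words
--     unique = []
--     for j in range(len(x)):
--         if j != 0 and j != (len(x) - 1):
--             if x[j] not in unique:
--                 count += 1
--                 unique.append(x[j])
--     if count > 1:
--         return True
--     else:
--         return False
-- ===== SOURCE B (Python) =====
-- def word_to_replace(x):
--     middle = x[1:-1]
--     return bool(middle) and any(c != middle[0] for c in middle)
-- ===== Notes on version B (the rewrite author's own statement) =====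
-- stated objective: simpler
-- what changed: Replaces the index loop that collects a growing list of distinct middle characters and counts them with one slice x[1:-1] plus a short-circuiting any() comparing each middle character against the first.
import Mathlib
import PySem

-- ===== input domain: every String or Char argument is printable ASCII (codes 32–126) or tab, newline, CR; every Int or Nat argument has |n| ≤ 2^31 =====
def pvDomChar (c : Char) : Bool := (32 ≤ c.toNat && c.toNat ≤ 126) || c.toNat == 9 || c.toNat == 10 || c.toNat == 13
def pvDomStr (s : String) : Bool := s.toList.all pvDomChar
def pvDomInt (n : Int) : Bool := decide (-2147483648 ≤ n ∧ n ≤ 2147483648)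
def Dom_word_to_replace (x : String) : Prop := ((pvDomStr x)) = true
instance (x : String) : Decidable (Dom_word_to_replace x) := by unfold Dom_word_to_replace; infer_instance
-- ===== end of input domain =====

-- B is simpler: it slices out the middle once and short-circuits on the first character that
-- differs from the middle's first, instead of maintaining a distinct-character list and a count.

-- ===== PORT A =====
-- loop body: for j in range(len(x)): if j != 0 and j != len(x)-1: if x[j] not in unique: count += 1; unique.append(x[j])
def wtrStepA (n : Int) (cs : List Char) (s : Int × List Char) (j : Int) : Int × List Char :=
  if j ≠ 0 ∧ j ≠ n - 1 then
    let c := PySem.List.pyGetD cs j ' '   -- x[j]; j ∈ range(len x) so always in range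
    if c ∉ s.2 then (s.1 + 1, s.2 ++ [c]) else s
  else s

def word_to_replace (x : String) : Bool :=
  let cs := x.toList
  let n : Int := PySem.Str.len x
  let st := (PySem.List.pyRange 0 n 1).foldl (wtrStepA n cs) (0, [])
  if st.1 > 1 then true else false

-- ===== PORT B =====
-- middle = x[1:-1]; return bool(middle) and any(c != middle[0] for c in middle)
def word_to_replace_alt (x : String) : Bool :=
  let middle := PySem.List.slice x.toList (some 1) (some (-1))
  match middle with
  | [] => false
  | c0 :: _ => middle.any (fun c => c ≠ c0)

-- ===== PRECONDITION & SPEC =====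
def Spec_word_to_replace (x : String) (out : Bool) : Prop := out = word_to_replace_alt x
instance (x : String) (out : Bool) : Decidable (Spec_word_to_replace x out) := by unfold Spec_word_to_replace; infer_instance

-- ===== CLAIM (what is proved, stated in full; the proofs are below) =====
def Claim_equal_word_to_replace : Prop := ∀ (x : String), Dom_word_to_replace x → Spec_word_to_replace x (word_to_replace x)

-- ===== LEMMAS AND PROOFS =====

-- A's inner dedup-accumulate step, with the index test already discharged
def wtrStep (s : Int × List Char) (c : Char) : Int × List Char :=
  if c ∉ s.2 then (s.1 + 1, s.2 ++ [c]) else s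

theorem wtrStep_ge (l : List Char) : ∀ (k : Int) (u : List Char), k ≤ (l.foldl wtrStep (k, u)).1 := by
  induction l with
  | nil => intro k u; simp
  | cons a t ih =>
    intro k u
    simp only [List.foldl_cons, wtrStep]
    split
    · exact le_trans (by omega) (ih (k + 1) (u ++ [a]))
    · exact ih k u

theorem wtrStep_incr (l : List Char) : ∀ (k : Int) (u : List Char) (c : Char),
    c ∈ l → c ∉ u → k + 1 ≤ (l.foldl wtrStep (k, u)).1 := by
  induction l with
  | nil => intro k u c hc; simp at hc
  | cons a t ih =>
    intro k u c hc hcu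
    simp only [List.foldl_cons, wtrStep]
    split
    · exact le_trans (by omega) (wtrStep_ge t (k + 1) (u ++ [a]))
    · rename_i ha
      rcases List.mem_cons.mp hc with rfl | hct
      · exact absurd (not_not.mp ha) hcu
      · exact ih k u c hct hcu

theorem wtrStep_const (l : List Char) : ∀ (k : Int) (u : List Char),
    (∀ c ∈ l, c ∈ u) → l.foldl wtrStep (k, u) = (k, u) := by
  induction l with
  | nil => intro k u _; simp
  | cons a t ih =>
    intro k u h
    simp only [List.foldl_cons, wtrStep]
    rw [if_neg (by simp [h a (List.mem_cons_self)])]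
    exact ih k u (fun c hc => h c (List.mem_cons_of_mem _ hc))

-- x[1:-1] as drop/take
theorem slice_mid (xs : List Char) :
    PySem.List.slice xs (some 1) (some (-1)) = (xs.drop 1).take (xs.length - 2) := by
  simp [PySem.List.slice, PySem.List.clampIdx]
  rcases xs with _ | ⟨a, t⟩
  · simp
  · simp only [List.length_cons, if_neg (by simp : ¬ (a :: t = []))]
    congr 1
    push_cast; omega

theorem mid_eq (cs : List Char) :
    cs.dropLast.drop 1 = (cs.drop 1).take (cs.length - 2) := by
  rw [List.dropLast_eq_take, List.drop_take, Nat.sub_sub]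

-- A's filtered index fold over range(len x) collapses to the plain fold over the middle list
theorem foldl_mid (cs : List Char) (h2 : 2 ≤ cs.length) :
    (PySem.List.pyRange 0 (cs.length : Int) 1).foldl (wtrStepA (cs.length : Int) cs) (0, []) =
    (cs.dropLast.drop 1).foldl wtrStep (0, []) := by
  set n : Int := (cs.length : Int) with hn
  have hsplit1 : PySem.List.pyRange 0 n 1 = PySem.List.pyRange 0 1 1 ++ PySem.List.pyRange 1 n 1 :=
    PySem.List.pyRange_one_append 0 1 n (by omega) (by omega)
  have hsplit2 : PySem.List.pyRange 1 n 1 = PySem.List.pyRange 1 (n-1) 1 ++ PySem.List.pyRange (n-1) n 1 :=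
    PySem.List.pyRange_one_append 1 (n-1) n (by omega) (by omega)
  have h01 : PySem.List.pyRange 0 1 1 = [0] := by
    have := PySem.List.pyRange_one_singleton (0 : Int); simpa using this
  have hlast : PySem.List.pyRange (n-1) n 1 = [n-1] := by
    have := PySem.List.pyRange_one_singleton (n-1 : Int)
    rw [show n - 1 + 1 = n by ring] at this
    exact this
  rw [hsplit1, hsplit2, h01, hlast, List.foldl_append, List.foldl_append]
  have e0 : ∀ s : Int × List Char, wtrStepA n cs s 0 = s := by
    intro s; simp [wtrStepA]
  have elast : ∀ s : Int × List Char, wtrStepA n cs s (n-1) = s := by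
    intro s; simp [wtrStepA]
  simp only [List.foldl_cons, List.foldl_nil, e0, elast]
  have hcongr : (PySem.List.pyRange 1 (n-1) 1).foldl (wtrStepA n cs) (0, []) =
      (PySem.List.pyRange 1 (n-1) 1).foldl
        (fun s j => wtrStep s (PySem.List.pyGetD cs.dropLast j ' ')) (0, []) := by
    apply PySem.List.foldl_congr_mem
    intro s j hj
    have hj' := (PySem.List.mem_pyRange_one).mp hj
    have hj0 : (0:Int) ≤ j := by omega
    have hjlt : j < (cs.length : Int) := by omega
    have hjdl : j < (cs.dropLast.length : Int) := by
      simp [List.length_dropLast]; omega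
    rw [wtrStepA, if_pos ⟨by omega, by omega⟩]
    rw [PySem.List.pyGetD_eq_getElem cs ' ' hj0 hjlt,
        PySem.List.pyGetD_eq_getElem cs.dropLast ' ' hj0 hjdl]
    simp only [wtrStep, List.getElem_dropLast]
  rw [hcongr, show (n - 1 : Int) = (cs.dropLast.length : Int) by simp [List.length_dropLast]; omega]
  exact PySem.List.foldl_pyRange_pyGetD' cs.dropLast ' ' wtrStep (0, []) (by omega)

-- count > 1 after the dedup fold ⟺ some middle character differs from the first
theorem final_eq (m : List Char) :
    (if (m.foldl wtrStep ((0 : Int), ([] : List Char))).1 > 1 then true else false)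
    = (match m with
       | [] => false
       | c0 :: _ => m.any (fun c => c ≠ c0)) := by
  rcases m with _ | ⟨c0, rest⟩
  · simp
  · simp only [List.foldl_cons,
      show wtrStep ((0 : Int), ([] : List Char)) c0 = (1, [c0]) by simp [wtrStep]]
    by_cases hall : ∀ c ∈ rest, c = c0
    · simp only [wtrStep_const rest 1 [c0] (by intro c hc; simp [hall c hc])]
      simp only [if_neg (by omega : ¬ ((1 : Int) > 1))]
      symm
      simp only [List.any_cons, ne_eq, decide_not]
      simp
      intro c hc
      exact hall c hc
    · push Not at hall
      obtain ⟨c, hc, hne⟩ := hall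
      have h2 := wtrStep_incr rest 1 [c0] c hc (by simp [hne])
      rw [if_pos (by omega)]
      symm
      simp only [List.any_eq_true]
      exact ⟨c, List.mem_cons_of_mem _ hc, by simp [hne]⟩

theorem wtr_list (cs : List Char) :
    (if ((PySem.List.pyRange 0 (cs.length : Int) 1).foldl (wtrStepA (cs.length : Int) cs) (0, [])).1 > 1
       then true else false)
    = (match (cs.drop 1).take (cs.length - 2) with
       | [] => false
       | c0 :: _ => ((cs.drop 1).take (cs.length - 2)).any (fun c => c ≠ c0)) := by
  by_cases h2 : 2 ≤ cs.length
  · simp only [foldl_mid cs h2, mid_eq]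
    exact final_eq _
  · have h01 : cs.length = 0 ∨ cs.length = 1 := by omega
    rcases h01 with h | h
    · rcases List.length_eq_zero_iff.mp h with rfl
      simp [PySem.List.pyRange_one_eq_nil]
    · obtain ⟨a, rfl⟩ := List.length_eq_one_iff.mp h
      simp only [show PySem.List.pyRange 0 ((List.length [a] : Nat) : Int) 1 = [0] by
        simpa using PySem.List.pyRange_one_singleton (0 : Int)]
      simp [wtrStepA]

theorem wtr_core (x : String) : word_to_replace x = word_to_replace_alt x := by
  simp only [word_to_replace, word_to_replace_alt, PySem.Str.len_eq, slice_mid]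
  exact wtr_list x.toList

-- ===== VERDICT (by name: the statement is the Claim_ definition above) =====
theorem word_to_replace_spec : Claim_equal_word_to_replace := by
  intro x _
  unfold Spec_word_to_replace
  exact wtr_core x
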